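-- pv_equiv track=rewrite | github.com/Nikku03/cell | cell_sim/layer6_essentiality/gene_rule_map.py | unique_rules_per_gene
-- ===== SOURCE A (Python) =====
-- def invert_to_rule_catalysers(
--     gene_to_rules: dict[str, set[str]],
-- ) -> dict[str, set[str]]:
--     """Return ``{rule_name: {locus_tag, ...}}`` - the inverse of the
--     gene->rules map. Used to answer 'how many genes catalyse this rule'
--     for rule-necessity weighting."""
--     rule_to_genes: dict[str, set[str]] = {}
--     for locus, rules in gene_to_rules.items():
--         for rule_name in rules:
--             rule_to_genes.setdefault(rule_name, set()).add(locus)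
--     return rule_to_genes
--
-- def unique_rules_per_gene(
--     gene_to_rules: dict[str, set[str]],
-- ) -> dict[str, set[str]]:
--     """For each gene, return the subset of its rules that have NO
--     other catalyser. Genes whose every rule has alternate catalysers
--     are absent from the result.
--
--     This directly addresses the v5 false-positive mechanism: a gene
--     whose enzyme activity is redundantly covered by another gene
--     should not be called essential even if its own rules go silent in
--     KO (the redundant gene still catalyses them). Feed the result to
--     ``PerRuleDetector.gene_to_rules`` to only consider uniquely-
--     required rules."""
--     rule_to_genes = invert_to_rule_catalysers(gene_to_rules)
--     out: dict[str, set[str]] = {}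
--     for locus, rules in gene_to_rules.items():
--         unique = {r for r in rules
--                   if len(rule_to_genes.get(r, set())) <= 1}
--         if unique:
--             out[locus] = unique
--     return out
-- ===== SOURCE B (Python) =====
-- def unique_rules_per_gene(gene_to_rules):
--     # One pass: rule -> its sole catalysing locus, or None once a second
--     # catalyser is seen; then group the still-sole rules by locus.
--     sole = {}
--     for locus, rules in gene_to_rules.items():
--         for rule_name in rules:
--             sole[rule_name] = None if rule_name in sole else locus
--     out = {}
--     for rule_name, locus in sole.items():
--         if locus is not None:
--             out.setdefault(locus, set()).add(rule_name)
--     return out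
-- ===== Notes on version B (the rewrite author's own statement) =====
-- stated objective: alternative
-- what changed: Instead of building the full rule->set-of-genes inverse index and then re-scanning every gene's rules against it, B keeps one dict mapping each rule to its sole catalysing locus (overwritten with a None sentinel on a second sighting) and emits the result by grouping the still-sole rules by locus.
import Mathlib
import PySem

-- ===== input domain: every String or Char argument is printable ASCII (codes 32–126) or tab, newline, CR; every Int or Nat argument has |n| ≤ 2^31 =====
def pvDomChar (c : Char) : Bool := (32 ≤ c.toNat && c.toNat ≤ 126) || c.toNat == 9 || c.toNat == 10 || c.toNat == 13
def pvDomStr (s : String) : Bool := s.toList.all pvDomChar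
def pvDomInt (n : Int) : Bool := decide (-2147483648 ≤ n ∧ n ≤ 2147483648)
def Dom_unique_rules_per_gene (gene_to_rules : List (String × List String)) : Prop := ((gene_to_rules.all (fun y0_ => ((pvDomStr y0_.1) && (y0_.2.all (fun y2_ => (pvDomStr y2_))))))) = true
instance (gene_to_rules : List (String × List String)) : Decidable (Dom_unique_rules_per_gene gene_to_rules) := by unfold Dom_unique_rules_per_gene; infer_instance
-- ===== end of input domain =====

-- B replaces A's full rule->set-of-genes inverse index (built with per-rule gene
-- sets, then re-scanned per gene) by a single rule->sole-locus map with a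
-- shared-sentinel, grouping the surviving rules by locus (objective: alternative).

-- ===== PORT A =====
def invert_to_rule_catalysers (gene_to_rules : List (String × List String)) :
    PySem.Dict String (PySem.Set String) :=
  gene_to_rules.foldl
    (fun rule_to_genes p =>
      p.2.foldl
        (fun d rule_name =>
          d.modify rule_name PySem.Set.empty (fun s => PySem.Set.add s p.1))
        rule_to_genes)
    PySem.Dict.empty

def unique_rules_per_gene (gene_to_rules : List (String × List String)) :
    List (String × List String) :=
  let rule_to_genes := invert_to_rule_catalysers gene_to_rules
  (gene_to_rules.foldl
    (fun out p =>
      let unique : PySem.Set String :=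
        p.2.foldl
          (fun s r =>
            if (rule_to_genes.getD r PySem.Set.empty).length ≤ 1
            then PySem.Set.add s r else s)
          PySem.Set.empty
      if !unique.isEmpty then out.insert p.1 unique else out)
    PySem.Dict.empty).items

-- ===== PORT B =====
def unique_rules_per_gene_alt (gene_to_rules : List (String × List String)) :
    List (String × List String) :=
  let sole : PySem.Dict String (Option String) :=
    gene_to_rules.foldl
      (fun sole p =>
        p.2.foldl
          (fun d rule_name =>
            d.insert rule_name (if d.contains rule_name then none else some p.1))
          sole)
      PySem.Dict.empty
  (sole.items.foldl
    (fun out pr =>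
      match pr.2 with
      | some locus => out.modify locus PySem.Set.empty (fun s => PySem.Set.add s pr.1)
      | none => out)
    PySem.Dict.empty).items

-- ===== PRECONDITION & SPEC =====
-- Pre_ admits exactly the association lists that encode a Python dict[str, set[str]]:
-- distinct gene keys and, per gene, distinct rules. Lists with duplicates encode no
-- Python input of A, so nothing is excluded that A ever returns on.
def Pre_unique_rules_per_gene (gene_to_rules : List (String × List String)) : Prop :=
  (gene_to_rules.map Prod.fst).Nodup ∧ ∀ p ∈ gene_to_rules, p.2.Nodup
instance (gene_to_rules : List (String × List String)) : Decidable (Pre_unique_rules_per_gene gene_to_rules) := by unfold Pre_unique_rules_per_gene; infer_instance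

def pvWitness_unique_rules_per_gene : (List (String × List String)) :=
  [("g1", ["r1", "r2"]), ("g2", ["r2"])]

def Spec_unique_rules_per_gene (gene_to_rules : List (String × List String)) (out : List (String × List String)) : Prop := out = unique_rules_per_gene_alt gene_to_rules
instance (gene_to_rules : List (String × List String)) (out : List (String × List String)) : Decidable (Spec_unique_rules_per_gene gene_to_rules out) := by unfold Spec_unique_rules_per_gene; infer_instance

-- ===== CLAIM (what is proved, stated in full; the proofs are below) =====
def Claim_equal_unique_rules_per_gene : Prop := ∀ (gene_to_rules : List (String × List String)), Dom_unique_rules_per_gene gene_to_rules → Pre_unique_rules_per_gene gene_to_rules → Spec_unique_rules_per_gene gene_to_rules (unique_rules_per_gene gene_to_rules)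

-- ===== LEMMAS AND PROOFS =====

-- catalysers of rule r, in gene order (the common abstraction both ports reduce to)
def pvCat (g : List (String × List String)) (r : String) : List String :=
  (g.filter (fun p => p.2.contains r)).map Prod.fst

def pvQ (g : List (String × List String)) (r : String) : Bool :=
  decide ((pvCat g r).length ≤ 1)

def pvUniq (g : List (String × List String)) (rules : List String) : List String :=
  rules.filter (pvQ g)

def pvCanon (g : List (String × List String)) : List (String × List String) :=
  (g.filter (fun p => !(pvUniq g p.2).isEmpty)).map (fun p => (p.1, pvUniq g p.2))

lemma pvCat_cons (p : String × List String) (g : List (String × List String)) (r : String) :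
    pvCat (p :: g) r = (if p.2.contains r then [p.1] else []) ++ pvCat g r := by
  by_cases h : r ∈ p.2 <;> simp [pvCat, List.filter_cons, h]

lemma cat_mem_of_mem {g : List (String × List String)} {p : String × List String} {r : String}
    (hp : p ∈ g) (hr : r ∈ p.2) : p.1 ∈ pvCat g r := by
  exact List.mem_map_of_mem (List.mem_filter.2 ⟨hp, by simp [hr]⟩)

-- ---- A side ----

lemma inv_inner_stable (L r0 : String) (rules : List String) :
    ∀ d : PySem.Dict String (PySem.Set String), r0 ∉ rules →
    (rules.foldl (fun d rule_name => d.modify rule_name ([] : PySem.Set String) (fun s => PySem.Set.add s L)) d).getD r0 ([] : PySem.Set String)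
      = d.getD r0 ([] : PySem.Set String) := by
  induction rules with
  | nil => intro d _; rfl
  | cons r rs ih =>
      intro d hmem
      rw [List.mem_cons, not_or] at hmem
      simp only [List.foldl_cons]
      rw [ih _ hmem.2, PySem.Dict.getD_modify]
      simp [hmem.1]

lemma inv_inner_getD (L r0 : String) (rules : List String) :
    ∀ d : PySem.Dict String (PySem.Set String), rules.Nodup →
    L ∉ d.getD r0 ([] : PySem.Set String) →
    (rules.foldl (fun d rule_name => d.modify rule_name ([] : PySem.Set String) (fun s => PySem.Set.add s L)) d).getD r0 ([] : PySem.Set String)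
      = d.getD r0 ([] : PySem.Set String) ++ (if r0 ∈ rules then [L] else []) := by
  induction rules with
  | nil => intro d _ _; simp
  | cons r rs ih =>
      intro d hnd hL
      rw [List.nodup_cons] at hnd
      simp only [List.foldl_cons]
      by_cases hr : r = r0
      · subst hr
        rw [inv_inner_stable _ _ _ _ hnd.1, PySem.Dict.getD_modify]
        rw [if_pos rfl, PySem.Set.add_of_not_mem hL]
        simp
      · have h2 : ¬ r0 = r := fun h => hr h.symm
        have h1 : (d.modify r ([] : PySem.Set String) (fun s => PySem.Set.add s L)).getD r0 ([] : PySem.Set String)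
            = d.getD r0 ([] : PySem.Set String) := by
          rw [PySem.Dict.getD_modify, if_neg h2]
        rw [ih _ hnd.2 (by rw [h1]; exact hL), h1]
        simp [List.mem_cons, h2]

lemma inv_getD (g : List (String × List String)) :
    ∀ (d : PySem.Dict String (PySem.Set String)) (r0 : String),
    (∀ p ∈ g, p.2.Nodup) → (g.map Prod.fst).Nodup →
    (∀ L ∈ d.getD r0 ([] : PySem.Set String), L ∉ g.map Prod.fst) →
    (g.foldl
      (fun rule_to_genes p =>
        p.2.foldl
          (fun d rule_name => d.modify rule_name ([] : PySem.Set String) (fun s => PySem.Set.add s p.1))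
          rule_to_genes) d).getD r0 ([] : PySem.Set String)
      = d.getD r0 ([] : PySem.Set String) ++ pvCat g r0 := by
  induction g with
  | nil => intro d r0 _ _ _; simp [pvCat]
  | cons p g ih =>
      intro d r0 hrule hk hfresh
      simp only [List.foldl_cons]
      have hp1 : p.1 ∉ d.getD r0 ([] : PySem.Set String) := fun h => hfresh _ h (by simp)
      have hstep := inv_inner_getD p.1 r0 p.2 d (hrule p (by simp)) hp1
      rw [List.map_cons, List.nodup_cons] at hk
      have hfresh' : ∀ L ∈ (p.2.foldl
          (fun d rule_name => d.modify rule_name ([] : PySem.Set String) (fun s => PySem.Set.add s p.1))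
          d).getD r0 ([] : PySem.Set String), L ∉ g.map Prod.fst := by
        intro L hL
        rw [hstep, List.mem_append] at hL
        rcases hL with hL | hL
        · exact fun hc => hfresh L hL (List.mem_cons_of_mem _ hc)
        · have : L = p.1 := by
            by_cases hmem : r0 ∈ p.2 <;> simp [hmem] at hL
            exact hL
          subst this; exact hk.1
      rw [ih _ r0 (fun q hq => hrule q (List.mem_cons_of_mem _ hq)) hk.2 hfresh', hstep,
          pvCat_cons]
      by_cases hmem : r0 ∈ p.2 <;> simp [hmem, List.append_assoc]

lemma invert_getD (g : List (String × List String)) (r : String)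
    (hrule : ∀ p ∈ g, p.2.Nodup) (hk : (g.map Prod.fst).Nodup) :
    (invert_to_rule_catalysers g).getD r ([] : PySem.Set String) = pvCat g r := by
  show (g.foldl
      (fun rule_to_genes p =>
        p.2.foldl
          (fun d rule_name => d.modify rule_name ([] : PySem.Set String) (fun s => PySem.Set.add s p.1))
          rule_to_genes) PySem.Dict.empty).getD r ([] : PySem.Set String) = pvCat g r
  rw [inv_getD g PySem.Dict.empty r hrule hk (by simp [PySem.Dict.getD_empty])]
  simp [PySem.Dict.getD_empty]

lemma comprehension_eq (c : String → Bool) (rules : List String) (h : rules.Nodup) :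
    rules.foldl (fun s r => if c r then PySem.Set.add s r else s) ([] : PySem.Set String)
      = rules.filter c := by
  rw [PySem.List.foldl_if_eq_foldl_filter c (fun s r => PySem.Set.add s r)]
  calc List.foldl (fun s r => PySem.Set.add s r) ([] : PySem.Set String) (rules.filter c)
      = PySem.Set.ofList (rules.filter c) := rfl
    _ = rules.filter c := PySem.Set.ofList_eq_self_of_nodup _ (h.filter c)

lemma A_eq_canon (g : List (String × List String))
    (hk : (g.map Prod.fst).Nodup) (hrule : ∀ p ∈ g, p.2.Nodup) :
    unique_rules_per_gene g = pvCanon g := by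
  show (g.foldl
    (fun out p =>
      if !(p.2.foldl
          (fun s r =>
            if ((invert_to_rule_catalysers g).getD r ([] : PySem.Set String)).length ≤ 1
            then PySem.Set.add s r else s)
          ([] : PySem.Set String)).isEmpty
      then out.insert p.1
        (p.2.foldl
          (fun s r =>
            if ((invert_to_rule_catalysers g).getD r ([] : PySem.Set String)).length ≤ 1
            then PySem.Set.add s r else s)
          ([] : PySem.Set String))
      else out)
    PySem.Dict.empty).items = pvCanon g
  have huniq : ∀ p ∈ g,
      (p.2.foldl
        (fun s r =>
          if ((invert_to_rule_catalysers g).getD r ([] : PySem.Set String)).length ≤ 1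
          then PySem.Set.add s r else s)
        ([] : PySem.Set String)) = pvUniq g p.2 := by
    intro p hp
    have hcongr := PySem.List.foldl_congr_mem p.2
      (fun s r =>
        if ((invert_to_rule_catalysers g).getD r ([] : PySem.Set String)).length ≤ 1
        then PySem.Set.add s r else s)
      (fun s r => if pvQ g r then PySem.Set.add s r else s)
      ([] : PySem.Set String)
      (by
        intro acc r _
        beta_reduce
        rw [invert_getD g r hrule hk]
        simp [pvQ])
    rw [hcongr, comprehension_eq _ _ (hrule p hp)]
    rfl
  have hbody := PySem.List.foldl_congr_mem g
    (fun out p =>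
      if !(p.2.foldl
          (fun s r =>
            if ((invert_to_rule_catalysers g).getD r ([] : PySem.Set String)).length ≤ 1
            then PySem.Set.add s r else s)
          ([] : PySem.Set String)).isEmpty
      then out.insert p.1
        (p.2.foldl
          (fun s r =>
            if ((invert_to_rule_catalysers g).getD r ([] : PySem.Set String)).length ≤ 1
            then PySem.Set.add s r else s)
          ([] : PySem.Set String))
      else out)
    (fun out p => if !(pvUniq g p.2).isEmpty then out.insert p.1 (pvUniq g p.2) else out)
    PySem.Dict.empty
    (by intro acc p hp; beta_reduce; rw [huniq p hp])
  rw [hbody]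
  have hfold := PySem.List.foldl_if_eq_foldl_filter (fun p : String × List String => !(pvUniq g p.2).isEmpty)
        (fun (out : PySem.Dict String (PySem.Set String)) p => out.insert p.1 (pvUniq g p.2)) g PySem.Dict.empty
  beta_reduce at hfold
  rw [hfold]
  rw [PySem.Dict.items_foldl_insert_fresh _ Prod.fst (fun p => pvUniq g p.2) _
        (by intro a _; simp [PySem.Dict.contains_empty])
        ((hk.sublist (List.Sublist.map Prod.fst (List.filter_sublist (l := g)))))]
  simp [pvCanon]
  rfl

-- ---- B side ----

def pvStat (v : Option (Option String)) (Ls : List String) : Option (Option String) :=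
  match Ls, v with
  | [], v => v
  | L :: Ls', none => if Ls'.isEmpty then some (some L) else some none
  | _ :: _, some _ => some none

def pvW (g : List (String × List String)) (r : String) : Option String :=
  match pvCat g r with
  | [L] => some L
  | _ => none

lemma sole_inner_stable (L r0 : String) (rules : List String) :
    ∀ d : PySem.Dict String (Option String), r0 ∉ rules →
    (rules.foldl (fun d rule_name => d.insert rule_name (if d.contains rule_name then none else some L)) d).get? r0
      = d.get? r0 := by
  induction rules with
  | nil => intro d _; rfl
  | cons r rs ih =>
      intro d hmem
      rw [List.mem_cons, not_or] at hmem
      simp only [List.foldl_cons]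
      rw [ih _ hmem.2, PySem.Dict.get?_insert]
      simp [hmem.1]

lemma sole_inner_get? (L r0 : String) (rules : List String) :
    ∀ d : PySem.Dict String (Option String), rules.Nodup →
    (rules.foldl (fun d rule_name => d.insert rule_name (if d.contains rule_name then none else some L)) d).get? r0
      = if r0 ∈ rules then some (if (d.get? r0).isSome then none else some L) else d.get? r0 := by
  induction rules with
  | nil => intro d _; simp
  | cons r rs ih =>
      intro d hnd
      rw [List.nodup_cons] at hnd
      simp only [List.foldl_cons]
      by_cases hr : r = r0
      · subst hr
        rw [sole_inner_stable _ _ _ _ hnd.1, PySem.Dict.get?_insert]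
        simp [PySem.Dict.contains_eq_isSome_get?]
      · have h2 : ¬ r0 = r := fun h => hr h.symm
        have h1 : (d.insert r (if d.contains r then none else some L)).get? r0 = d.get? r0 := by
          rw [PySem.Dict.get?_insert, if_neg h2]
        rw [ih _ hnd.2, h1]
        simp [List.mem_cons, h2]

lemma sole_get? (g : List (String × List String)) :
    ∀ (d : PySem.Dict String (Option String)) (r0 : String), (∀ p ∈ g, p.2.Nodup) →
    (g.foldl
      (fun sole p =>
        p.2.foldl
          (fun d rule_name => d.insert rule_name (if d.contains rule_name then none else some p.1))
          sole) d).get? r0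
      = pvStat (d.get? r0) (pvCat g r0) := by
  induction g with
  | nil => intro d r0 _; simp [pvCat, pvStat]
  | cons p g ih =>
      intro d r0 hrule
      simp only [List.foldl_cons]
      rw [ih _ r0 (fun q hq => hrule q (List.mem_cons_of_mem _ hq))]
      rw [sole_inner_get? p.1 r0 p.2 d (hrule p (by simp)), pvCat_cons]
      by_cases hmem : r0 ∈ p.2
      · rw [if_pos hmem]
        have hc : p.2.contains r0 = true := List.contains_iff_mem.2 hmem
        rw [hc, if_pos rfl]
        cases hv : d.get? r0 <;>
          cases hcat : pvCat g r0 <;>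
            simp [pvStat, hv, hcat]
      · have hc : p.2.contains r0 = false := by
          rw [Bool.eq_false_iff]; intro h; exact hmem (List.contains_iff_mem.1 h)
        rw [if_neg hmem, hc]
        simp [pvStat]

lemma sole_keys (g : List (String × List String)) :
    ∀ d : PySem.Dict String (Option String),
    (g.foldl
      (fun sole p =>
        p.2.foldl
          (fun d rule_name => d.insert rule_name (if d.contains rule_name then none else some p.1))
          sole) d).keys
      = PySem.Set.update d.keys (g.flatMap (fun p => p.2)) := by
  induction g with
  | nil => intro d; simp [PySem.Set.update]
  | cons p g ih =>
      intro d
      simp only [List.foldl_cons]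
      rw [ih, PySem.Dict.keys_foldl_insert]
      simp [PySem.Set.update, List.foldl_append]

lemma count_flat (g : List (String × List String)) (r : String)
    (hrule : ∀ p ∈ g, p.2.Nodup) :
    (g.flatMap (fun p => p.2)).count r = (pvCat g r).length := by
  induction g with
  | nil => simp [pvCat]
  | cons p g ih =>
      rw [List.flatMap_cons, List.count_append, pvCat_cons,
          ih (fun q hq => hrule q (List.mem_cons_of_mem _ hq))]
      by_cases hmem : r ∈ p.2
      · have h1 : p.2.count r = 1 := List.count_eq_one_of_mem (hrule p (by simp)) hmem
        rw [List.length_append, h1, List.contains_iff_mem.2 hmem, if_pos rfl]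
        simp
      · have h1 : p.2.count r = 0 := List.count_eq_zero.2 hmem
        have hc : p.2.contains r = false := by
          rw [Bool.eq_false_iff]; intro h; exact hmem (List.contains_iff_mem.1 h)
        rw [h1, hc, List.length_append]
        simp

lemma update_filterMap (h : String → Option (String × String)) (l : List String) :
    ∀ s : PySem.Set String,
    (∀ x, (h x).isSome → s.count x + l.count x ≤ 1) →
    (PySem.Set.update s l).filterMap h = s.filterMap h ++ l.filterMap h := by
  induction l with
  | nil => intro s _; simp [PySem.Set.update]
  | cons x t ih =>
      intro s hcnt
      have hstep : PySem.Set.update s (x :: t) = PySem.Set.update (s.add x) t := by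
        simp [PySem.Set.update]
      rw [hstep]
      cases hx : h x with
      | none =>
          have hadd : (s.add x).filterMap h = s.filterMap h := by
            unfold PySem.Set.add
            split
            · rfl
            · simp [List.filterMap_append, hx]
          rw [ih (s.add x) ?_, hadd]
          · simp [List.filterMap_cons, hx]
          · intro y hy
            have hyx : ¬ y = x := by intro he; subst he; simp [hx] at hy
            have hxy : ¬ x = y := fun he => hyx he.symm
            have h1 : (s.add x).count y ≤ s.count y := by
              unfold PySem.Set.add
              split
              · exact le_refl _
              · simp [List.count_append, List.count_cons, hyx, hxy]
            have h2 := hcnt y hy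
            simp [List.count_cons, hyx] at h2
            omega
      | some v =>
          have hcx := hcnt x (by simp [hx])
          rw [List.count_cons_self] at hcx
          have hsx : s.count x = 0 := by omega
          have htx : t.count x = 0 := by omega
          have hnotmem : x ∉ s := by
            intro hmem
            have := List.count_pos_iff.2 hmem
            omega
          rw [PySem.Set.add_of_not_mem hnotmem]
          rw [ih (s ++ [x]) ?_]
          · simp [List.filterMap_append, List.filterMap_cons, hx]
          · intro y hy
            by_cases hyx : y = x
            · subst hyx
              simp [List.count_append, List.count_cons, hsx, htx]
            · have hxy : ¬ x = y := fun he => hyx he.symm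
              have h2 := hcnt y hy
              simp [List.count_cons, hyx] at h2
              simp [List.count_append, List.count_cons, hyx, hxy]
              omega

lemma filterMap_ite (q : String → Bool) (f : String → String × String) (rules : List String) :
    rules.filterMap (fun r => if q r then some (f r) else none)
      = (rules.filter q).map f := by
  induction rules with
  | nil => rfl
  | cons r rs ih =>
      by_cases h : q r <;> simp [List.filterMap_cons, List.filter_cons, h, ih]

lemma fold_match_eq (items : List (String × Option String)) :
    ∀ out : PySem.Dict String (PySem.Set String),
    items.foldl
      (fun out pr =>
        match pr.2 with
        | some locus => out.modify locus ([] : PySem.Set String) (fun s => PySem.Set.add s pr.1)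
        | none => out) out
      = (items.filterMap (fun pr => pr.2.map (fun L => (pr.1, L)))).foldl
          (fun out q => out.modify q.2 ([] : PySem.Set String) (fun s => PySem.Set.add s q.1)) out := by
  induction items with
  | nil => intro out; rfl
  | cons pr rest ih =>
      intro out
      cases h : pr.2 <;> simp [List.filterMap_cons, h, ih]

lemma modify_fold_same_key (k : String) (rs : List String) :
    ∀ out : PySem.Dict String (PySem.Set String), rs ≠ [] →
    rs.foldl (fun out r => out.modify k ([] : PySem.Set String) (fun s => PySem.Set.add s r)) out
      = out.insert k (PySem.Set.update (out.getD k ([] : PySem.Set String)) rs) := by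
  induction rs with
  | nil => intro out h; exact absurd rfl h
  | cons r rs ih =>
      intro out _
      simp only [List.foldl_cons]
      rcases rs with _ | ⟨r2, rs'⟩
      · simp [PySem.Dict.modify, PySem.Set.update]
      · rw [ih _ (by simp)]
        unfold PySem.Dict.modify
        rw [PySem.Dict.insert_insert_self, PySem.Dict.getD_insert_self]
        simp [PySem.Set.update]

lemma modify_fold_mapped (k : String) (rs : List String) :
    ∀ out : PySem.Dict String (PySem.Set String), rs ≠ [] →
    ((rs.map (fun r => (r, k))).foldl
      (fun out q => out.modify q.2 ([] : PySem.Set String) (fun s => PySem.Set.add s q.1)) out)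
      = out.insert k (PySem.Set.update (out.getD k ([] : PySem.Set String)) rs) := by
  intro out hne
  rw [List.foldl_map]
  exact modify_fold_same_key k rs out hne

lemma blocks_fold (gAll : List (String × List String)) (g : List (String × List String)) :
    ∀ out : PySem.Dict String (PySem.Set String),
    (∀ p ∈ g, out.contains p.1 = false) → (g.map Prod.fst).Nodup →
    (∀ p ∈ g, p.2.Nodup) →
    (g.foldl
      (fun out p =>
        ((pvUniq gAll p.2).map (fun r => (r, p.1))).foldl
          (fun out q => out.modify q.2 ([] : PySem.Set String) (fun s => PySem.Set.add s q.1)) out)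
      out).items
      = out.items ++ (g.filter (fun p => !(pvUniq gAll p.2).isEmpty)).map
          (fun p => (p.1, pvUniq gAll p.2)) := by
  induction g with
  | nil => intro out _ _ _; simp
  | cons p g ih =>
      intro out hfresh hk hrule
      rw [List.map_cons, List.nodup_cons] at hk
      simp only [List.foldl_cons]
      by_cases hemp : (pvUniq gAll p.2).isEmpty
      · have hnil : pvUniq gAll p.2 = [] := List.isEmpty_iff.1 hemp
        rw [hnil]
        simp only [List.map_nil, List.foldl_nil]
        rw [ih _ (fun q hq => hfresh q (List.mem_cons_of_mem _ hq)) hk.2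
              (fun q hq => hrule q (List.mem_cons_of_mem _ hq))]
        simp [List.filter_cons, hnil]
      · have hne : pvUniq gAll p.2 ≠ [] := fun h => by simp [h] at hemp
        rw [modify_fold_mapped p.1 _ out hne]
        have hget : out.getD p.1 ([] : PySem.Set String) = [] := by
          apply PySem.Dict.getD_of_not_contains
          exact hfresh p (by simp)
        have hupd : PySem.Set.update (out.getD p.1 ([] : PySem.Set String)) (pvUniq gAll p.2)
            = pvUniq gAll p.2 := by
          rw [hget]
          calc PySem.Set.update ([] : PySem.Set String) (pvUniq gAll p.2)
              = PySem.Set.ofList (pvUniq gAll p.2) := rfl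
            _ = pvUniq gAll p.2 :=
                PySem.Set.ofList_eq_self_of_nodup _ ((hrule p (by simp)).filter _)
        rw [hupd]
        have hfresh' : ∀ q ∈ g, (out.insert p.1 (pvUniq gAll p.2)).contains q.1 = false := by
          intro q hq
          rw [PySem.Dict.contains_insert]
          have hne2 : q.1 ≠ p.1 := fun he => hk.1 (he ▸ List.mem_map_of_mem hq)
          simp [hne2, hfresh q (List.mem_cons_of_mem _ hq)]
        rw [ih _ hfresh' hk.2 (fun q hq => hrule q (List.mem_cons_of_mem _ hq))]
        rw [PySem.Dict.items_insert_of_not_contains _ _ (hfresh p (by simp))]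
        simp [List.filter_cons, hemp]

lemma flat_cat_ne_nil {g : List (String × List String)} {r : String}
    (h : r ∈ g.flatMap (fun p => p.2)) : pvCat g r ≠ [] := by
  obtain ⟨p, hp, hr⟩ := List.mem_flatMap.1 h
  intro hc
  have hm := cat_mem_of_mem hp hr
  rw [hc] at hm
  simp at hm

lemma B_eq_canon (g : List (String × List String))
    (hk : (g.map Prod.fst).Nodup) (hrule : ∀ p ∈ g, p.2.Nodup) :
    unique_rules_per_gene_alt g = pvCanon g := by
  show ((g.foldl
      (fun sole p =>
        p.2.foldl
          (fun d rule_name => d.insert rule_name (if d.contains rule_name then none else some p.1))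
          sole) PySem.Dict.empty).items.foldl
    (fun out pr =>
      match pr.2 with
      | some locus => out.modify locus ([] : PySem.Set String) (fun s => PySem.Set.add s pr.1)
      | none => out)
    PySem.Dict.empty).items = pvCanon g
  set sole := g.foldl
      (fun sole p =>
        p.2.foldl
          (fun d rule_name => d.insert rule_name (if d.contains rule_name then none else some p.1))
          sole) PySem.Dict.empty with hsole
  have hkeys : sole.keys = PySem.Set.ofList (g.flatMap (fun p => p.2)) := by
    rw [hsole, sole_keys g PySem.Dict.empty]
    simp [PySem.Dict.keys_empty]
    rfl
  have hnodup : sole.keys.Nodup := by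
    rw [hkeys]; exact PySem.Set.nodup_ofList _
  have hitems : sole.items = sole.keys.map (fun r => (r, pvW g r)) := by
    rw [PySem.Dict.items_eq_map_keys sole hnodup none]
    apply List.map_congr_left
    intro r hrk
    have hr : r ∈ g.flatMap (fun p => p.2) := by
      rw [hkeys] at hrk
      exact (PySem.Set.mem_ofList _ _).1 hrk
    have hcatne := flat_cat_ne_nil hr
    have hget : sole.get? r = pvStat none (pvCat g r) := by
      rw [hsole, sole_get? g PySem.Dict.empty r hrule]
      rw [PySem.Dict.get?_empty]
    rw [PySem.Dict.getD_eq_get?_getD, hget]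
    unfold pvW pvStat
    cases hcat : pvCat g r with
    | nil => exact absurd hcat hcatne
    | cons L Ls =>
        cases Ls with
        | nil => simp
        | cons M Ms => simp
  rw [fold_match_eq, hitems, hkeys, List.filterMap_map]
  have hh : (fun r => Option.map (fun L => (r, L)) (pvW g r))
      = fun r => ((fun pr : String × Option String => Option.map (fun L => (pr.1, L)) pr.2) ∘ (fun r => (r, pvW g r))) r := by
    funext r; rfl
  have hflateq : PySem.Set.ofList (g.flatMap (fun p => p.2))
      = PySem.Set.update ([] : PySem.Set String) (g.flatMap (fun p => p.2)) := rfl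
  rw [hflateq, update_filterMap _ _ ([] : PySem.Set String) ?_]
  · have hper : (g.flatMap (fun p => p.2)).filterMap
        ((fun pr : String × Option String => Option.map (fun L => (pr.1, L)) pr.2) ∘ (fun r => (r, pvW g r)))
        = g.flatMap (fun p => (pvUniq g p.2).map (fun r => (r, p.1))) := by
      rw [List.filterMap_flatMap]
      rw [List.flatMap_def, List.flatMap_def, List.map_congr_left ?_]
      intro p hp
      have hpt : ∀ r ∈ p.2,
          ((fun pr : String × Option String => Option.map (fun L => (pr.1, L)) pr.2) ∘ (fun r => (r, pvW g r))) r
            = if pvQ g r then some ((r, p.1)) else none := by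
        intro r hr
        have hmem := cat_mem_of_mem hp hr
        simp only [Function.comp]
        unfold pvW pvQ
        cases hcat : pvCat g r with
        | nil => rw [hcat] at hmem; exact absurd hmem (by simp)
        | cons L Ls =>
            cases Ls with
            | nil =>
                rw [hcat] at hmem
                have : L = p.1 := by
                  have := List.mem_singleton.1 hmem
                  exact this.symm
                subst this
                simp [hcat]
            | cons M Ms => simp [hcat]
      calc p.2.filterMap
            ((fun pr : String × Option String => Option.map (fun L => (pr.1, L)) pr.2) ∘ (fun r => (r, pvW g r)))
          = p.2.filterMap (fun r => if pvQ g r then some ((r, p.1)) else none) :=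
            List.filterMap_congr hpt
        _ = (pvUniq g p.2).map (fun r => (r, p.1)) := filterMap_ite _ _ _
    rw [List.filterMap_nil, List.nil_append, hper, List.foldl_flatMap]
    rw [blocks_fold g g PySem.Dict.empty
          (fun p _ => PySem.Dict.contains_empty _) hk hrule]
    rfl
  · intro x hx
    have hsome : pvW g x ≠ none := by
      intro hn
      simp [Function.comp, hn] at hx
    have hcat1 : (pvCat g x).length = 1 := by
      unfold pvW at hsome
      cases hcat : pvCat g x with
      | nil => simp [hcat] at hsome
      | cons L Ls =>
          cases Ls with
          | nil => simp [hcat]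
          | cons M Ms => simp [hcat] at hsome
    rw [List.count_nil, count_flat g x hrule, hcat1]

-- ===== VERDICT (by name: the statement is the Claim_ definition above) =====
theorem unique_rules_per_gene_spec : Claim_equal_unique_rules_per_gene := by
  intro g _ hpre
  unfold Spec_unique_rules_per_gene
  rw [A_eq_canon g hpre.1 hpre.2, B_eq_canon g hpre.1 hpre.2]
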